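-- pv_equiv track=rewrite | github.com/johnlspouge/Time-Homogeneity_of_Infection | 5_llr_test/Executable/jls_animal_format.py | is_survivors
-- ===== SOURCE A (Python) =====
-- def is_survivors( survivors ): # # uninfected animals after Challenge i.
--     if not all( isinstance( n, int ) and n >= 0 for n in survivors ):
--         return False
--     if len( survivors ) <= 1:
--         return False
--     successive_pairs = list( zip( survivors, survivors[1:] ) )
--     if not all( j <= i for i,j in successive_pairs ):
--         return False
--     return True
-- ===== SOURCE B (Python) =====
-- def is_survivors(survivors):  # uninfected animals after Challenge i.
--     if not all(isinstance(n, int) for n in survivors):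
--         return False
--     if len(survivors) <= 1:
--         return False
--     # non-increasing iff the list equals its own reverse-sorted copy;
--     # all non-negative iff the minimum is non-negative.
--     return min(survivors) >= 0 and sorted(survivors, reverse=True) == survivors
-- ===== Notes on version B (the rewrite author's own statement) =====
-- stated objective: alternative
-- what changed: Replaced A's element-wise non-negativity scan and explicit zip-pairwise comparison by global characterisations: min(survivors) >= 0 and survivors == sorted(survivors, reverse=True).
import Mathlib
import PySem

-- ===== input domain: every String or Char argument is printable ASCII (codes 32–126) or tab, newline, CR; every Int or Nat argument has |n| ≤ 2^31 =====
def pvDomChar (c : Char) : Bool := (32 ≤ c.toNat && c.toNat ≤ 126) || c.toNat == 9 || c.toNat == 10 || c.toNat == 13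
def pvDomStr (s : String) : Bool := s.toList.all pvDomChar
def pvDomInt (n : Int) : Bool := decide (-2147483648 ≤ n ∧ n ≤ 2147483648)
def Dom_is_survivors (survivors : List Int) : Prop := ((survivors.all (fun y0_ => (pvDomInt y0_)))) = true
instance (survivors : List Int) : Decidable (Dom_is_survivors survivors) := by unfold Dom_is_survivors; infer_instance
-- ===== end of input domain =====

-- B replaces A's element-wise scans by global characterisations (min ≥ 0, equality with
-- the reverse-sorted copy); objective: alternative (same behaviour, sort-based check).


-- ===== PORT A =====
-- literal transliteration of A: three separate checks in A's order
def is_survivors (survivors : List Int) : Bool :=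
  -- `isinstance(n, int)` is always true on List Int
  if !(survivors.all (fun n => decide (0 ≤ n))) then false
  else if survivors.length ≤ 1 then false
  else
    -- successive_pairs = list(zip(survivors, survivors[1:]))
    let successive_pairs := survivors.zip (PySem.List.slice survivors (some 1) none)
    if !(successive_pairs.all (fun p => decide (p.2 ≤ p.1))) then false
    else true

-- ===== PORT B =====
-- Source B: isinstance check (vacuous on List Int), length guard, then
-- min(survivors) >= 0 and sorted(survivors, reverse=True) == survivors
def is_survivors_alt (survivors : List Int) : Bool :=
  if survivors.length ≤ 1 then false
  else
    match PySem.List.min? survivors (fun x => x) with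
    | none => false  -- unreachable: the list is nonempty here
    | some m => decide (0 ≤ m) && (PySem.List.sorted survivors (fun x => x) true == survivors)

-- ===== PRECONDITION & SPEC =====
def Spec_is_survivors (survivors : List Int) (out : Bool) : Prop := out = is_survivors_alt survivors
instance (survivors : List Int) (out : Bool) : Decidable (Spec_is_survivors survivors out) := by unfold Spec_is_survivors; infer_instance

-- ===== CLAIM (what is proved, stated in full; the proofs are below) =====
def Claim_equal_is_survivors : Prop := ∀ (survivors : List Int), Dom_is_survivors survivors → Spec_is_survivors survivors (is_survivors survivors)

-- ===== LEMMAS AND PROOFS =====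

-- min(xs) ≥ 0 iff every element is ≥ 0 (nonempty list)
theorem min_nonneg_iff_all (s : List Int) (m : Int)
    (hm : PySem.List.min? s (fun x => x) = some m) :
    (0 ≤ m ↔ s.all (fun n => decide (0 ≤ n)) = true) := by
  constructor
  · intro h0
    simp only [List.all_eq_true, decide_eq_true_eq]
    intro n hn
    exact le_trans h0 (PySem.List.min?_isMin hm n hn)
  · intro hall
    have hmem := PySem.List.min?_mem hm
    simp only [List.all_eq_true, decide_eq_true_eq] at hall
    exact hall m hmem

-- the zip-with-tail all-check is exactly Chain' (· ≥ ·)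
theorem zip_tail_all_eq_chain' (s : List Int) :
    ((s.zip s.tail).all (fun p => decide (p.2 ≤ p.1)) = true) ↔ List.IsChain (fun a b => b ≤ a) s := by
  induction s with
  | nil => simp
  | cons x t ih =>
    cases t with
    | nil => simp
    | cons y u =>
      simp only [List.tail_cons, List.zip_cons_cons, List.all_cons, Bool.and_eq_true,
        decide_eq_true_eq, List.isChain_cons_cons]
      exact and_congr Iff.rfl ih

-- non-increasing (Chain') iff the list equals its reverse-sorted copy
theorem chain'_iff_sorted_rev_eq (s : List Int) :
    List.IsChain (fun a b => b ≤ a) s ↔ PySem.List.sorted s (fun x => x) true = s := by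
  constructor
  · intro h
    exact PySem.List.sorted_rev_eq_self_of_pairwise (xs := s) (key := fun x => x) (List.isChain_iff_pairwise.mp h)
  · intro h
    have hp := PySem.List.sorted_pairwise_rev (xs := s) (key := fun x => x)
    rw [h] at hp
    exact List.isChain_iff_pairwise.mpr hp

-- ===== VERDICT (by name: the statement is the Claim_ definition above) =====
theorem is_survivors_spec : Claim_equal_is_survivors := by
  intro s _
  unfold Spec_is_survivors is_survivors is_survivors_alt
  by_cases hl : s.length ≤ 1
  · by_cases ha : s.all (fun n => decide (0 ≤ n)) <;> simp [hl, ha]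
  · have hne : s ≠ [] := by
      intro h; subst h; simp at hl
    obtain ⟨m, hm⟩ : ∃ m, PySem.List.min? s (fun x => x) = some m := by
      cases h : PySem.List.min? s (fun x => x) with
      | none => exact absurd ((PySem.List.min?_eq_none_iff (xs:=s) (key:=fun x=>x)).mp h) hne
      | some m => exact ⟨m, rfl⟩
    rw [PySem.List.slice_from_one]
    simp only [hl, hm, if_false]
    by_cases ha : s.all (fun n => decide (0 ≤ n)) = true
    · have h0 : (0 ≤ m) := (min_nonneg_iff_all s m hm).mpr ha
      simp only [ha, Bool.not_true, h0, decide_true, Bool.true_and]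
      by_cases hc : List.IsChain (fun a b : Int => b ≤ a) s
      · have := (zip_tail_all_eq_chain' s).mpr hc
        have hs := (chain'_iff_sorted_rev_eq s).mp hc
        simp [this, hs]
      · have h1 : ¬ ((s.zip s.tail).all (fun p => decide (p.2 ≤ p.1)) = true) :=
          fun h => hc ((zip_tail_all_eq_chain' s).mp h)
        have h2 : PySem.List.sorted s (fun x => x) true ≠ s :=
          fun h => hc ((chain'_iff_sorted_rev_eq s).mpr h)
        simp only [Bool.not_eq_true] at h1
        simp [h1, h2]
    · have h0 : ¬ (0 ≤ m) := fun h => ha ((min_nonneg_iff_all s m hm).mp h)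
      simp [ha, h0]
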